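-- pv_equiv track=rewrite | github.com/hardbyte/python-common-expression-language | python/cel/tui.py | _syntax_highlight_expr
-- ===== SOURCE A (Python) =====
-- def _syntax_highlight_expr(expr: str) -> str:
--     """Apply basic syntax highlighting to CEL expression using Rich markup."""
--     import re
--
--     # Use a token-based approach to avoid overlapping markup
--     tokens = []
--     i = 0
--
--     # Simple tokenizer
--     while i < len(expr):
--         # Skip whitespace
--         if expr[i].isspace():
--             tokens.append(('space', expr[i]))
--             i += 1
--             continue
--
--         # String literals
--         if expr[i] in '"\'':
--             quote = expr[i]
--             j = i + 1
--             while j < len(expr) and expr[j] != quote: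
--                 if expr[j] == '\\' and j + 1 < len(expr):
--                     j += 2
--                 else:
--                     j += 1
--             if j < len(expr):
--                 j += 1
--             tokens.append(('string', expr[i:j]))
--             i = j
--             continue
--
--         # Numbers
--         if expr[i].isdigit():
--             j = i
--             while j < len(expr) and (expr[j].isdigit() or expr[j] == '.'):
--                 j += 1
--             tokens.append(('number', expr[i:j]))
--             i = j
--             continue
--
--         # Identifiers/keywords
--         if expr[i].isalpha() or expr[i] == '_':
--             j = i
--             while j < len(expr) and (expr[j].isalnum() or expr[j] == '_'):
--                 j += 1
--             word = expr[i:j]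
--             # Check if keyword
--             if word in ['true', 'false', 'null', 'in', 'has']:
--                 tokens.append(('keyword', word))
--             else:
--                 # Check if function (followed by '(')
--                 k = j
--                 while k < len(expr) and expr[k].isspace():
--                     k += 1
--                 if k < len(expr) and expr[k] == '(':
--                     tokens.append(('function', word))
--                 else:
--                     tokens.append(('identifier', word))
--             i = j
--             continue
--
--         # Multi-char operators
--         if i + 1 < len(expr):
--             two_char = expr[i:i+2]
--             if two_char in ['>=', '<=', '==', '!=', '&&', '||']:
--                 tokens.append(('operator', two_char))
--                 i += 2
--                 continue
--
--         # Single char operators and punctuation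
--         if expr[i] in '+-*/%<>!&|()[]{},.':
--             tokens.append(('operator', expr[i]))
--             i += 1
--             continue
--
--         # Anything else
--         tokens.append(('other', expr[i]))
--         i += 1
--
--     # Build highlighted string
--     result = []
--     for token_type, text in tokens:
--         if token_type == 'keyword':
--             result.append(f'[bold green]{text}[/bold green]')
--         elif token_type == 'string':
--             result.append(f'[yellow]{text}[/yellow]')
--         elif token_type == 'number':
--             result.append(f'[cyan]{text}[/cyan]')
--         elif token_type == 'function':
--             result.append(f'[magenta]{text}[/magenta]')
--         elif token_type == 'operator':
--             result.append(f'[bold]{text}[/bold]')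
--         else:
--             result.append(text)
--
--     return ''.join(result)
-- ===== SOURCE B (Python) =====
-- OPS2 = ('>=', '<=', '==', '!=', '&&', '||')
-- KEYWORDS = ('true', 'false', 'null', 'in', 'has')
--
--
-- def _take_run(rs, pred):
--     buf = []
--     while rs and pred(rs[-1]):
--         buf.append(rs.pop())
--     return ''.join(buf)
--
--
-- def _take_string(rs):
--     q = rs.pop()
--     buf = [q]
--     while rs:
--         ch = rs.pop()
--         buf.append(ch)
--         if ch == q:
--             break
--         if ch == '\\' and rs:
--             buf.append(rs.pop())
--     return ''.join(buf)
--
--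
-- def _call_ahead(rs):
--     for ch in reversed(rs):
--         if not ch.isspace():
--             return ch == '('
--     return False
--
--
-- def _syntax_highlight_expr(expr: str) -> str:
--     """Apply basic syntax highlighting to CEL expression using Rich markup."""
--     rs = list(expr)
--     rs.reverse()  # pop() now yields the characters left to right
--     out = []
--     while rs:
--         c = rs[-1]
--         if c.isspace():
--             out.append(rs.pop())
--         elif c in '"\'':
--             out.append('[yellow]%s[/yellow]' % _take_string(rs))
--         elif c.isdigit():
--             out.append('[cyan]%s[/cyan]' % _take_run(rs, lambda ch: ch.isdigit() or ch == '.'))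
--         elif c.isalpha() or c == '_':
--             word = _take_run(rs, lambda ch: ch.isalnum() or ch == '_')
--             if word in KEYWORDS:
--                 out.append('[bold green]%s[/bold green]' % word)
--             elif _call_ahead(rs):
--                 out.append('[magenta]%s[/magenta]' % word)
--             else:
--                 out.append(word)
--         elif len(rs) >= 2 and c + rs[-2] in OPS2:
--             two = rs.pop() + rs.pop()
--             out.append('[bold]%s[/bold]' % two)
--         elif c in '+-*/%<>!&|()[]{},.':
--             out.append('[bold]%s[/bold]' % rs.pop())
--         else:
--             out.append(rs.pop())
--     return ''.join(out)
-- ===== Notes on version B (the rewrite author's own statement) =====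
-- stated objective: alternative
-- what changed: Replaces the two-pass index-walking tokenizer (build a tagged token list over positions i/j/k, then a second rendering pass) with a fused single pass that consumes characters by popping from a reversed list and emits each Rich-markup fragment immediately, with no index arithmetic and no intermediate token list.
import Mathlib
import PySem

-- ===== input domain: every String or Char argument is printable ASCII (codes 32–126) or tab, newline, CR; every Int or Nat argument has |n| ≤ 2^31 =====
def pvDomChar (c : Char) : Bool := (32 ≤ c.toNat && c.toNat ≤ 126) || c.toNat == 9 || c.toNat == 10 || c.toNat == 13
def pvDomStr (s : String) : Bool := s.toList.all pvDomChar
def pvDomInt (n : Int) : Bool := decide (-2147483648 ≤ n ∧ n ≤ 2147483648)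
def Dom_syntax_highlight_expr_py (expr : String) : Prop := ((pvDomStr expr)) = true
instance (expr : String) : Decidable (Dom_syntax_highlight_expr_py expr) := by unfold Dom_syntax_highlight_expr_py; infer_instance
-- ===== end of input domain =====

-- B replaces A's two-pass index-walking tokenizer by a fused single pass consuming a char list
-- and emitting markup fragments directly (objective: alternative; same cost).

-- ===== PORT A =====
-- A's token tags 'space'/'string'/… become an inductive tag type.
inductive PvTokTy
  | space | string | number | keyword | function | identifier | operator | other
deriving DecidableEq, Repr

-- the keyword list and operator tables of A (shared literals with B's python)
def pvKeywords : List (List Char) := ["true".toList, "false".toList, "null".toList, "in".toList, "has".toList]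
def pvOps2 : List (List Char) := [">=".toList, "<=".toList, "==".toList, "!=".toList, "&&".toList, "||".toList]
def pvOpChars : List Char := "+-*/%<>!&|()[]{},.".toList

-- named termination lemmas (cited from decreasing_by so the definitions stay small)
theorem pvDecOne (len j : Nat) (h : j < len) : len - (j + 1) < len - j := by omega
theorem pvDecTwo (len j : Nat) (h : j < len) : len - (j + 2) < len - j := by omega
theorem pvDecTo (len j jn : Nat) (h : j < len) (h1 : j + 1 <= jn) : len - jn < len - j := by omega
theorem pvDecIf (len j jn : Nat) (h : j < len) (h1 : j + 1 <= jn) :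
    len - (if jn < len then jn + 1 else jn) < len - j := by split <;> omega
theorem pvLtCons {a : Type} (c : a) (t : List a) : t.length < (c :: t).length := by simp
theorem pvLtCons2 {a : Type} (c d : a) (t : List a) : t.length < (c :: d :: t).length := by
  simp

-- A's inner `while` scanning loops, index-walking (used for numbers, identifiers and the
-- whitespace lookahead k; each is this loop with its predicate)
def aScan (p : Char → Bool) (cs : List Char) (j : Nat) : Nat :=
  if _h : j < cs.length then
    if p (cs.getD j ' ') then aScan p cs (j + 1) else j
  else j
termination_by cs.length - j
decreasing_by
  exact pvDecOne cs.length j _h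

-- A's string-literal scanning loop (returns j when expr[j] = quote or j = len)
def aStrEnd (cs : List Char) (q : Char) (j : Nat) : Nat :=
  if _h : j < cs.length then
    if cs.getD j ' ' = q then j
    else if cs.getD j ' ' = '\\' ∧ j + 1 < cs.length then aStrEnd cs q (j + 2)
    else aStrEnd cs q (j + 1)
  else j
termination_by cs.length - j
decreasing_by
  · exact pvDecTwo cs.length j _h
  · exact pvDecOne cs.length j _h

theorem le_aScan (p : Char → Bool) (cs : List Char) (j : Nat) : j ≤ aScan p cs j := by
  unfold aScan
  split
  · split
    · exact le_trans (Nat.le_succ j) (le_aScan p cs (j + 1))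
    · exact le_refl j
  · exact le_refl j
termination_by cs.length - j

theorem le_aStrEnd (cs : List Char) (q : Char) (j : Nat) : j ≤ aStrEnd cs q j := by
  unfold aStrEnd
  split
  · split
    · exact le_refl j
    · split
      · exact le_trans (by omega) (le_aStrEnd cs q (j + 2))
      · exact le_trans (Nat.le_succ j) (le_aStrEnd cs q (j + 1))
  · exact le_refl j
termination_by cs.length - j


theorem aScan_step (p : Char → Bool) (cs : List Char) (j : Nat) (h : j < cs.length)
    (hp : p (cs.getD j ' ') = true) : aScan p cs j = aScan p cs (j + 1) := by
  rw [aScan]; simp only [h, dif_pos, hp, if_pos]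

theorem alnum_of_alpha_or_underscore (c : Char) (h : (PySem.Chars.isalpha c || c = '_') = true) :
    (PySem.Chars.isalnum c || c = '_') = true := by
  simp only [PySem.Chars.isalnum, Bool.or_eq_true] at h ⊢
  tauto

-- A's tokenizer: the main while loop over the index i, producing the token list
def aTok (cs : List Char) (i : Nat) : List (PvTokTy × List Char) :=
  if h : i < cs.length then
    let c := cs.getD i ' '
    if PySem.Chars.isspace c then
      (.space, [c]) :: aTok cs (i + 1)
    else if c = '"' ∨ c = '\'' then
      let j := aStrEnd cs c (i + 1)
      let j2 := if j < cs.length then j + 1 else j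
      (.string, (cs.drop i).take (j2 - i)) :: aTok cs j2
    else if PySem.Chars.isdigit c then
      let j := aScan (fun ch => PySem.Chars.isdigit ch || ch = '.') cs i
      (.number, (cs.drop i).take (j - i)) :: aTok cs j
    else if PySem.Chars.isalpha c || c = '_' then
      let j := aScan (fun ch => PySem.Chars.isalnum ch || ch = '_') cs i
      let word := (cs.drop i).take (j - i)
      let tk : PvTokTy :=
        if word ∈ pvKeywords then .keyword
        else
          let k := aScan PySem.Chars.isspace cs j
          if k < cs.length ∧ cs.getD k ' ' = '(' then .function else .identifier
      (tk, word) :: aTok cs j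
    else if i + 1 < cs.length ∧ [c, cs.getD (i + 1) ' '] ∈ pvOps2 then
      (.operator, [c, cs.getD (i + 1) ' ']) :: aTok cs (i + 2)
    else if c ∈ pvOpChars then
      (.operator, [c]) :: aTok cs (i + 1)
    else
      (.other, [c]) :: aTok cs (i + 1)
  else []
termination_by cs.length - i
decreasing_by
  · exact pvDecOne cs.length i h
  · exact pvDecIf cs.length i _ h (le_aStrEnd cs (cs.getD i ' ') (i + 1))
  · exact pvDecTo cs.length i _ h
      (aScan_step (fun ch => PySem.Chars.isdigit ch || ch = '.') cs i h
        (by rename_i hdg; exact Bool.or_eq_true_iff.mpr (Or.inl hdg)) ▸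
       le_aScan (fun ch => PySem.Chars.isdigit ch || ch = '.') cs (i + 1))
  · exact pvDecTo cs.length i _ h
      (aScan_step (fun ch => PySem.Chars.isalnum ch || ch = '_') cs i h
        (by rename_i hal; exact alnum_of_alpha_or_underscore _ hal) ▸
       le_aScan (fun ch => PySem.Chars.isalnum ch || ch = '_') cs (i + 1))
  · exact pvDecTwo cs.length i h
  · exact pvDecOne cs.length i h
  · exact pvDecOne cs.length i h

-- A's rendering pass: the if/elif chain over the token tag
def aWrap (t : PvTokTy × List Char) : List Char :=
  if t.1 = .keyword then "[bold green]".toList ++ t.2 ++ "[/bold green]".toList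
  else if t.1 = .string then "[yellow]".toList ++ t.2 ++ "[/yellow]".toList
  else if t.1 = .number then "[cyan]".toList ++ t.2 ++ "[/cyan]".toList
  else if t.1 = .function then "[magenta]".toList ++ t.2 ++ "[/magenta]".toList
  else if t.1 = .operator then "[bold]".toList ++ t.2 ++ "[/bold]".toList
  else t.2

def syntax_highlight_expr_py (expr : String) : String :=
  String.mk (((aTok expr.toList 0).foldl (fun acc t => acc ++ [aWrap t]) []).flatten)

-- ===== PORT B =====
-- B pops from a reversed Python list, i.e. consumes the characters in order: the port
-- consumes the char list from the front.

-- B's _take_run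
def bTakeRun (p : Char → Bool) : List Char → List Char × List Char
  | [] => ([], [])
  | c :: t =>
    if p c then
      let r := bTakeRun p t
      (c :: r.1, r.2)
    else ([], c :: t)

-- B's _take_string after popping the opening quote q (the while body)
def bStrBody (q : Char) : List Char → List Char × List Char
  | [] => ([], [])
  | c :: t =>
    if c = q then ([c], t)
    else if c = '\\' then
      match t with
      | [] => ([c], [])
      | d :: t2 =>
        let r := bStrBody q t2
        (c :: d :: r.1, r.2)
    else
      let r := bStrBody q t
      (c :: r.1, r.2)
termination_by cs => cs.length
decreasing_by
  · exact pvLtCons2 c d t2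
  · exact pvLtCons c t

-- B's _call_ahead
def bCallAhead : List Char → Bool
  | [] => false
  | c :: t => if PySem.Chars.isspace c then bCallAhead t else c = '('

theorem bTakeRun_rest_le (p : Char → Bool) (cs : List Char) : (bTakeRun p cs).2.length ≤ cs.length := by
  induction cs with
  | nil => simp [bTakeRun]
  | cons c t ih =>
    simp only [bTakeRun]
    split
    · exact le_trans ih (Nat.le_succ _)
    · exact le_refl _

theorem bStrBody_rest_le (q : Char) (cs : List Char) : (bStrBody q cs).2.length ≤ cs.length := by
  match cs with
  | [] => unfold bStrBody; simp
  | c :: t =>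
    by_cases h1 : c = q
    · unfold bStrBody; simp [h1]
    · by_cases h2 : c = '\\'
      · match t with
        | [] => subst h2; unfold bStrBody; simp [h1]
        | d :: t2 =>
          have ih := bStrBody_rest_le q t2
          subst h2
          unfold bStrBody
          simp [h1]
          omega
      · have ih := bStrBody_rest_le q t
        unfold bStrBody
        simp only [h1, if_false, h2, if_false, List.length_cons]
        omega
termination_by cs.length

theorem pvLtStr (q : Char) (c : Char) (t : List Char) :
    (bStrBody q t).2.length < (c :: t).length :=
  Nat.lt_of_le_of_lt (bStrBody_rest_le q t) (pvLtCons c t)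

theorem bTakeRun_rest_cons (p : Char → Bool) (c : Char) (t : List Char) (h : p c = true) :
    (bTakeRun p (c :: t)).2 = (bTakeRun p t).2 := by
  simp [bTakeRun, h]

theorem pvLtRun (p : Char → Bool) (c : Char) (t : List Char) (h : p c = true) :
    (bTakeRun p (c :: t)).2.length < (c :: t).length := by
  rw [bTakeRun_rest_cons p c t h]
  exact Nat.lt_of_le_of_lt (bTakeRun_rest_le p t) (pvLtCons c t)

-- B's main while loop: each round consumes one token's characters and emits its fragment
def bGo : List Char → List (List Char)
  | [] => []
  | c :: t =>
    if PySem.Chars.isspace c then [c] :: bGo t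
    else if c = '"' ∨ c = '\'' then
      let r := bStrBody c t
      ("[yellow]".toList ++ (c :: r.1) ++ "[/yellow]".toList) :: bGo r.2
    else if PySem.Chars.isdigit c then
      let r := bTakeRun (fun ch => PySem.Chars.isdigit ch || ch = '.') (c :: t)
      ("[cyan]".toList ++ r.1 ++ "[/cyan]".toList) :: bGo r.2
    else if PySem.Chars.isalpha c || c = '_' then
      let r := bTakeRun (fun ch => PySem.Chars.isalnum ch || ch = '_') (c :: t)
      (if r.1 ∈ pvKeywords then "[bold green]".toList ++ r.1 ++ "[/bold green]".toList
       else if bCallAhead r.2 then "[magenta]".toList ++ r.1 ++ "[/magenta]".toList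
       else r.1) :: bGo r.2
    else
      match t with
      | d :: t2 =>
        if [c, d] ∈ pvOps2 then ("[bold]".toList ++ [c, d] ++ "[/bold]".toList) :: bGo t2
        else if c ∈ pvOpChars then ("[bold]".toList ++ [c] ++ "[/bold]".toList) :: bGo (d :: t2)
        else [c] :: bGo (d :: t2)
      | [] =>
        if c ∈ pvOpChars then ["[bold]".toList ++ [c] ++ "[/bold]".toList]
        else [[c]]
termination_by cs => cs.length
decreasing_by
  · exact pvLtCons c t
  · exact pvLtStr c c t
  · exact pvLtRun _ c t (by rename_i h3; exact Bool.or_eq_true_iff.mpr (Or.inl h3))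
  · exact pvLtRun _ c t (by rename_i h4; exact alnum_of_alpha_or_underscore _ h4)
  · exact pvLtCons2 c d t2
  · exact pvLtCons c (d :: t2)
  · exact pvLtCons c (d :: t2)

def syntax_highlight_expr_py_alt (expr : String) : String :=
  String.mk (bGo expr.toList).flatten

-- ===== PRECONDITION & SPEC =====
def Spec_syntax_highlight_expr_py (expr : String) (out : String) : Prop := out = syntax_highlight_expr_py_alt expr
instance (expr : String) (out : String) : Decidable (Spec_syntax_highlight_expr_py expr out) := by unfold Spec_syntax_highlight_expr_py; infer_instance

-- ===== CLAIM (what is proved, stated in full; the proofs are below) =====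
def Claim_equal_syntax_highlight_expr_py : Prop := ∀ (expr : String), Dom_syntax_highlight_expr_py expr → Spec_syntax_highlight_expr_py expr (syntax_highlight_expr_py expr)

-- ===== LEMMAS AND PROOFS =====

theorem aScan_le (p : Char → Bool) (cs : List Char) (j : Nat) (hj : j ≤ cs.length) :
    aScan p cs j ≤ cs.length := by
  unfold aScan
  split
  · split
    · exact aScan_le p cs (j + 1) (by omega)
    · exact hj
  · exact hj
termination_by cs.length - j

theorem aStrEnd_le (cs : List Char) (q : Char) (j : Nat) (hj : j ≤ cs.length) :
    aStrEnd cs q j ≤ cs.length := by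
  unfold aStrEnd
  split
  · split
    · exact hj
    · split
      · exact aStrEnd_le cs q (j + 2) (by omega)
      · exact aStrEnd_le cs q (j + 1) (by omega)
  · exact hj
termination_by cs.length - j

theorem drop_eq_getD_cons (cs : List Char) (j : Nat) (h : j < cs.length) :
    cs.drop j = cs.getD j ' ' :: cs.drop (j + 1) := by
  rw [List.getD_eq_getElem cs ' ' h]
  exact List.drop_eq_getElem_cons h

-- equation lemmas for the A-side scanners
theorem aScan_stop (p : Char → Bool) (cs : List Char) (j : Nat)
    (h : ¬ (j < cs.length ∧ p (cs.getD j ' ') = true)) : aScan p cs j = j := by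
  rw [aScan]
  by_cases h1 : j < cs.length
  · have h2 : ¬ p (cs.getD j ' ') = true := fun hp => h ⟨h1, hp⟩
    simp only [h1, dif_pos]
    rw [if_neg h2]
  · simp only [h1, dif_neg, not_false_iff]

theorem aStrEnd_stop (cs : List Char) (q : Char) (j : Nat) (h : ¬ j < cs.length) :
    aStrEnd cs q j = j := by
  rw [aStrEnd]; simp only [h, dif_neg, not_false_iff]

theorem aStrEnd_quote (cs : List Char) (q : Char) (j : Nat) (h : j < cs.length)
    (hq : cs.getD j ' ' = q) : aStrEnd cs q j = j := by
  rw [aStrEnd]; simp only [h, dif_pos]; rw [if_pos hq]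

theorem aStrEnd_esc (cs : List Char) (q : Char) (j : Nat) (h : j < cs.length)
    (hq : ¬ cs.getD j ' ' = q) (hbs : cs.getD j ' ' = '\\' ∧ j + 1 < cs.length) :
    aStrEnd cs q j = aStrEnd cs q (j + 2) := by
  rw [aStrEnd]; simp only [h, dif_pos]; rw [if_neg hq, if_pos hbs]

theorem aStrEnd_plain (cs : List Char) (q : Char) (j : Nat) (h : j < cs.length)
    (hq : ¬ cs.getD j ' ' = q) (hbs : ¬ (cs.getD j ' ' = '\\' ∧ j + 1 < cs.length)) :
    aStrEnd cs q j = aStrEnd cs q (j + 1) := by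
  rw [aStrEnd]; simp only [h, dif_pos]; rw [if_neg hq, if_neg hbs]

-- B's run scanner equals A's index scan
theorem bTakeRun_eq (p : Char → Bool) (cs : List Char) (j : Nat) :
    bTakeRun p (cs.drop j) = ((cs.drop j).take (aScan p cs j - j), cs.drop (aScan p cs j)) := by
  by_cases h : j < cs.length
  · have hd := drop_eq_getD_cons cs j h
    by_cases hp : p (cs.getD j ' ') = true
    · have hA : aScan p cs j = aScan p cs (j + 1) := aScan_step p cs j h hp
      have ih := bTakeRun_eq p cs (j + 1)
      have h1 := le_aScan p cs (j + 1)
      have h2 : aScan p cs (j + 1) - j = (aScan p cs (j + 1) - (j + 1)) + 1 := by omega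
      rw [hA, hd, h2, List.take_succ_cons]
      simp only [bTakeRun, hp, if_pos, ih]
    · have hA : aScan p cs j = j := aScan_stop p cs j (fun hc => hp hc.2)
      rw [hA, hd]
      simp only [bTakeRun, hp, Nat.sub_self, List.take_zero]
      rw [← hd]
      simp
  · have h0 : cs.drop j = [] := List.drop_eq_nil_of_le (Nat.le_of_not_lt h)
    have hA : aScan p cs j = j := aScan_stop p cs j (fun hc => h hc.1)
    rw [hA, h0]
    simp [bTakeRun, h0]
termination_by cs.length - j
decreasing_by
  omega

-- B's string-body scanner equals A's string scan (including the closing-quote step)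
theorem bStrBody_eq (cs : List Char) (q : Char) (j : Nat) (hj : j ≤ cs.length) :
    bStrBody q (cs.drop j)
      = ((cs.drop j).take ((if aStrEnd cs q j < cs.length then aStrEnd cs q j + 1 else aStrEnd cs q j) - j),
         cs.drop (if aStrEnd cs q j < cs.length then aStrEnd cs q j + 1 else aStrEnd cs q j)) := by
  by_cases h : j < cs.length
  · have hd := drop_eq_getD_cons cs j h
    by_cases hq : cs.getD j ' ' = q
    · rw [aStrEnd_quote cs q j h hq, if_pos h, hd, hq]
      unfold bStrBody
      have h1 : j + 1 - j = 1 := by omega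
      simp [h1]
    · by_cases hbs : cs.getD j ' ' = '\\' ∧ j + 1 < cs.length
      · have hd2 := drop_eq_getD_cons cs (j + 1) hbs.2
        have ih := bStrBody_eq cs q (j + 2) (by omega)
        have hne : ¬ ('\\' = q) := fun hcon => hq (by rw [hbs.1, hcon])
        have hE := le_aStrEnd cs q (j + 2)
        rw [aStrEnd_esc cs q j h hq hbs]
        set E2 := if aStrEnd cs q (j + 2) < cs.length then aStrEnd cs q (j + 2) + 1 else aStrEnd cs q (j + 2) with hE2
        have hge : j + 2 ≤ E2 := by rw [hE2]; split <;> omega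
        have h2 : E2 - j = (E2 - (j + 2)) + 1 + 1 := by omega
        rw [show j + 1 + 1 = j + 2 from rfl] at hd2
        rw [hd, hbs.1, hd2, h2, List.take_succ_cons, List.take_succ_cons]
        unfold bStrBody
        rw [if_neg hne, if_pos rfl]
        simp only [ih]
      · by_cases hbs1 : cs.getD j ' ' = '\\'
        · have hlen : j + 1 = cs.length := by
            rcases Decidable.not_and_iff_or_not.mp hbs with hc | hc
            · exact absurd hbs1 hc
            · omega
          have hnl : ¬ (j + 1 < cs.length) := by omega
          have hA : aStrEnd cs q j = j + 1 := by
            rw [aStrEnd_plain cs q j h hq hbs, aStrEnd_stop cs q (j + 1) hnl]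
          rw [hA, if_neg hnl, hd, hbs1]
          have ht : cs.drop (j + 1) = [] := List.drop_eq_nil_of_le (by omega)
          rw [ht]
          unfold bStrBody
          have hne : ¬ ('\\' = q) := fun hcon => hq (by rw [hbs1, hcon])
          rw [if_neg hne, if_pos rfl]
          have h1 : j + 1 - j = 1 := by omega
          simp [h1, ht]
        · have hnbs : ¬ (cs.getD j ' ' = '\\' ∧ j + 1 < cs.length) := fun hc => hbs1 hc.1
          have ih := bStrBody_eq cs q (j + 1) (by omega)
          have hE := le_aStrEnd cs q (j + 1)
          rw [aStrEnd_plain cs q j h hq hnbs]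
          set E2 := if aStrEnd cs q (j + 1) < cs.length then aStrEnd cs q (j + 1) + 1 else aStrEnd cs q (j + 1) with hE2
          have hge : j + 1 ≤ E2 := by rw [hE2]; split <;> omega
          have h2 : E2 - j = (E2 - (j + 1)) + 1 := by omega
          rw [hd, h2, List.take_succ_cons]
          unfold bStrBody
          rw [if_neg hq, if_neg hbs1]
          simp only [ih]
  · have h0 : cs.drop j = [] := List.drop_eq_nil_of_le (Nat.le_of_not_lt h)
    have hA : aStrEnd cs q j = j := aStrEnd_stop cs q j h
    rw [hA, if_neg h, h0]
    unfold bStrBody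
    simp [h0]
termination_by cs.length - j
decreasing_by
  all_goals omega

-- B's lookahead equals A's k-scan-then-test
theorem bCallAhead_eq (cs : List Char) (j : Nat) :
    bCallAhead (cs.drop j)
      = decide (aScan PySem.Chars.isspace cs j < cs.length ∧ cs.getD (aScan PySem.Chars.isspace cs j) ' ' = '(') := by
  by_cases h : j < cs.length
  · have hd := drop_eq_getD_cons cs j h
    by_cases hs : PySem.Chars.isspace (cs.getD j ' ') = true
    · have hA : aScan PySem.Chars.isspace cs j = aScan PySem.Chars.isspace cs (j + 1) :=
        aScan_step _ cs j h hs
      have ih := bCallAhead_eq cs (j + 1)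
      rw [hA, hd]
      simp only [bCallAhead, hs, if_pos]
      exact ih
    · have hA : aScan PySem.Chars.isspace cs j = j := aScan_stop _ cs j (fun hc => hs hc.2)
      rw [hA, hd]
      simp only [bCallAhead, hs, if_neg]
      simp [h]
  · have h0 : cs.drop j = [] := List.drop_eq_nil_of_le (Nat.le_of_not_lt h)
    have hA : aScan PySem.Chars.isspace cs j = j := aScan_stop _ cs j (fun hc => h hc.1)
    rw [hA, h0]
    simp [bCallAhead, h]
termination_by cs.length - j
decreasing_by
  omega

-- equation lemmas for aTok (one per branch of A's while body)
theorem aTok_stop (cs : List Char) (j : Nat) (h : ¬ j < cs.length) : aTok cs j = [] := by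
  rw [aTok]; simp only [h, dif_neg, not_false_iff]

theorem aTok_space (cs : List Char) (j : Nat) (h : j < cs.length)
    (hs : PySem.Chars.isspace (cs.getD j ' ') = true) :
    aTok cs j = (.space, [cs.getD j ' ']) :: aTok cs (j + 1) := by
  rw [aTok]; simp only [h, dif_pos]; rw [if_pos hs]

theorem aTok_str (cs : List Char) (j : Nat) (h : j < cs.length)
    (hs : ¬ PySem.Chars.isspace (cs.getD j ' ') = true)
    (hq : cs.getD j ' ' = '"' ∨ cs.getD j ' ' = '\'') :
    aTok cs j = (.string, (cs.drop j).take
        ((if aStrEnd cs (cs.getD j ' ') (j + 1) < cs.length then aStrEnd cs (cs.getD j ' ') (j + 1) + 1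
          else aStrEnd cs (cs.getD j ' ') (j + 1)) - j)) ::
      aTok cs (if aStrEnd cs (cs.getD j ' ') (j + 1) < cs.length then aStrEnd cs (cs.getD j ' ') (j + 1) + 1
               else aStrEnd cs (cs.getD j ' ') (j + 1)) := by
  rw [aTok]; simp only [h, dif_pos]; rw [if_neg hs, if_pos hq]

theorem aTok_num (cs : List Char) (j : Nat) (h : j < cs.length)
    (hs : ¬ PySem.Chars.isspace (cs.getD j ' ') = true)
    (hq : ¬ (cs.getD j ' ' = '"' ∨ cs.getD j ' ' = '\''))
    (hdg : PySem.Chars.isdigit (cs.getD j ' ') = true) :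
    aTok cs j = (.number, (cs.drop j).take
        (aScan (fun ch => PySem.Chars.isdigit ch || ch = '.') cs j - j)) ::
      aTok cs (aScan (fun ch => PySem.Chars.isdigit ch || ch = '.') cs j) := by
  rw [aTok]; simp only [h, dif_pos]; rw [if_neg hs, if_neg hq, if_pos hdg]

theorem aTok_word (cs : List Char) (j : Nat) (h : j < cs.length)
    (hs : ¬ PySem.Chars.isspace (cs.getD j ' ') = true)
    (hq : ¬ (cs.getD j ' ' = '"' ∨ cs.getD j ' ' = '\''))
    (hdg : ¬ PySem.Chars.isdigit (cs.getD j ' ') = true)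
    (hal : (PySem.Chars.isalpha (cs.getD j ' ') || cs.getD j ' ' = '_') = true) :
    aTok cs j = ((if (cs.drop j).take (aScan (fun ch => PySem.Chars.isalnum ch || ch = '_') cs j - j) ∈ pvKeywords
          then PvTokTy.keyword
          else if aScan PySem.Chars.isspace cs (aScan (fun ch => PySem.Chars.isalnum ch || ch = '_') cs j) < cs.length ∧
                  cs.getD (aScan PySem.Chars.isspace cs (aScan (fun ch => PySem.Chars.isalnum ch || ch = '_') cs j)) ' ' = '('
               then PvTokTy.function else PvTokTy.identifier),
        (cs.drop j).take (aScan (fun ch => PySem.Chars.isalnum ch || ch = '_') cs j - j)) ::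
      aTok cs (aScan (fun ch => PySem.Chars.isalnum ch || ch = '_') cs j) := by
  rw [aTok]; simp only [h, dif_pos]; rw [if_neg hs, if_neg hq, if_neg hdg, if_pos hal]

theorem aTok_op2 (cs : List Char) (j : Nat) (h : j < cs.length)
    (hs : ¬ PySem.Chars.isspace (cs.getD j ' ') = true)
    (hq : ¬ (cs.getD j ' ' = '"' ∨ cs.getD j ' ' = '\''))
    (hdg : ¬ PySem.Chars.isdigit (cs.getD j ' ') = true)
    (hal : ¬ (PySem.Chars.isalpha (cs.getD j ' ') || cs.getD j ' ' = '_') = true)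
    (hc : j + 1 < cs.length ∧ [cs.getD j ' ', cs.getD (j + 1) ' '] ∈ pvOps2) :
    aTok cs j = (.operator, [cs.getD j ' ', cs.getD (j + 1) ' ']) :: aTok cs (j + 2) := by
  rw [aTok]; simp only [h, dif_pos]; rw [if_neg hs, if_neg hq, if_neg hdg, if_neg hal, if_pos hc]

theorem aTok_op1 (cs : List Char) (j : Nat) (h : j < cs.length)
    (hs : ¬ PySem.Chars.isspace (cs.getD j ' ') = true)
    (hq : ¬ (cs.getD j ' ' = '"' ∨ cs.getD j ' ' = '\''))
    (hdg : ¬ PySem.Chars.isdigit (cs.getD j ' ') = true)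
    (hal : ¬ (PySem.Chars.isalpha (cs.getD j ' ') || cs.getD j ' ' = '_') = true)
    (hc : ¬ (j + 1 < cs.length ∧ [cs.getD j ' ', cs.getD (j + 1) ' '] ∈ pvOps2))
    (hop : cs.getD j ' ' ∈ pvOpChars) :
    aTok cs j = (.operator, [cs.getD j ' ']) :: aTok cs (j + 1) := by
  rw [aTok]; simp only [h, dif_pos]; rw [if_neg hs, if_neg hq, if_neg hdg, if_neg hal, if_neg hc, if_pos hop]

theorem aTok_other (cs : List Char) (j : Nat) (h : j < cs.length)
    (hs : ¬ PySem.Chars.isspace (cs.getD j ' ') = true)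
    (hq : ¬ (cs.getD j ' ' = '"' ∨ cs.getD j ' ' = '\''))
    (hdg : ¬ PySem.Chars.isdigit (cs.getD j ' ') = true)
    (hal : ¬ (PySem.Chars.isalpha (cs.getD j ' ') || cs.getD j ' ' = '_') = true)
    (hc : ¬ (j + 1 < cs.length ∧ [cs.getD j ' ', cs.getD (j + 1) ' '] ∈ pvOps2))
    (hop : ¬ cs.getD j ' ' ∈ pvOpChars) :
    aTok cs j = (.other, [cs.getD j ' ']) :: aTok cs (j + 1) := by
  rw [aTok]; simp only [h, dif_pos]; rw [if_neg hs, if_neg hq, if_neg hdg, if_neg hal, if_neg hc, if_neg hop]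

-- equation lemmas for bGo (one per branch of B's while body)
theorem bGo_space (c : Char) (t : List Char) (h : PySem.Chars.isspace c = true) :
    bGo (c :: t) = [c] :: bGo t := by
  conv_lhs => unfold bGo
  rw [if_pos h]

theorem bGo_str (c : Char) (t : List Char) (h1 : ¬ PySem.Chars.isspace c = true)
    (h2 : c = '"' ∨ c = '\'') :
    bGo (c :: t) = ("[yellow]".toList ++ (c :: (bStrBody c t).1) ++ "[/yellow]".toList) :: bGo (bStrBody c t).2 := by
  conv_lhs => unfold bGo
  rw [if_neg h1, if_pos h2]

theorem bGo_num (c : Char) (t : List Char) (h1 : ¬ PySem.Chars.isspace c = true)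
    (h2 : ¬ (c = '"' ∨ c = '\'')) (h3 : PySem.Chars.isdigit c = true) :
    bGo (c :: t) = ("[cyan]".toList ++ (bTakeRun (fun ch => PySem.Chars.isdigit ch || ch = '.') (c :: t)).1 ++ "[/cyan]".toList) ::
      bGo (bTakeRun (fun ch => PySem.Chars.isdigit ch || ch = '.') (c :: t)).2 := by
  conv_lhs => unfold bGo
  rw [if_neg h1, if_neg h2, if_pos h3]

theorem bGo_word (c : Char) (t : List Char) (h1 : ¬ PySem.Chars.isspace c = true)
    (h2 : ¬ (c = '"' ∨ c = '\'')) (h3 : ¬ PySem.Chars.isdigit c = true)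
    (h4 : (PySem.Chars.isalpha c || c = '_') = true) :
    bGo (c :: t) = (if (bTakeRun (fun ch => PySem.Chars.isalnum ch || ch = '_') (c :: t)).1 ∈ pvKeywords
        then "[bold green]".toList ++ (bTakeRun (fun ch => PySem.Chars.isalnum ch || ch = '_') (c :: t)).1 ++ "[/bold green]".toList
        else if bCallAhead (bTakeRun (fun ch => PySem.Chars.isalnum ch || ch = '_') (c :: t)).2
        then "[magenta]".toList ++ (bTakeRun (fun ch => PySem.Chars.isalnum ch || ch = '_') (c :: t)).1 ++ "[/magenta]".toList
        else (bTakeRun (fun ch => PySem.Chars.isalnum ch || ch = '_') (c :: t)).1) ::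
      bGo (bTakeRun (fun ch => PySem.Chars.isalnum ch || ch = '_') (c :: t)).2 := by
  conv_lhs => unfold bGo
  rw [if_neg h1, if_neg h2, if_neg h3, if_pos h4]

theorem bGo_op2 (c d : Char) (t2 : List Char) (h1 : ¬ PySem.Chars.isspace c = true)
    (h2 : ¬ (c = '"' ∨ c = '\'')) (h3 : ¬ PySem.Chars.isdigit c = true)
    (h4 : ¬ (PySem.Chars.isalpha c || c = '_') = true) (h5 : [c, d] ∈ pvOps2) :
    bGo (c :: d :: t2) = ("[bold]".toList ++ [c, d] ++ "[/bold]".toList) :: bGo t2 := by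
  conv_lhs => unfold bGo
  rw [if_neg h1, if_neg h2, if_neg h3, if_neg h4]
  simp only [if_pos h5]

theorem bGo_op1_cons (c d : Char) (t2 : List Char) (h1 : ¬ PySem.Chars.isspace c = true)
    (h2 : ¬ (c = '"' ∨ c = '\'')) (h3 : ¬ PySem.Chars.isdigit c = true)
    (h4 : ¬ (PySem.Chars.isalpha c || c = '_') = true) (h5 : ¬ [c, d] ∈ pvOps2)
    (h6 : c ∈ pvOpChars) :
    bGo (c :: d :: t2) = ("[bold]".toList ++ [c] ++ "[/bold]".toList) :: bGo (d :: t2) := by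
  conv_lhs => unfold bGo
  rw [if_neg h1, if_neg h2, if_neg h3, if_neg h4]
  simp only [if_neg h5, if_pos h6]

theorem bGo_other_cons (c d : Char) (t2 : List Char) (h1 : ¬ PySem.Chars.isspace c = true)
    (h2 : ¬ (c = '"' ∨ c = '\'')) (h3 : ¬ PySem.Chars.isdigit c = true)
    (h4 : ¬ (PySem.Chars.isalpha c || c = '_') = true) (h5 : ¬ [c, d] ∈ pvOps2)
    (h6 : ¬ c ∈ pvOpChars) :
    bGo (c :: d :: t2) = [c] :: bGo (d :: t2) := by
  conv_lhs => unfold bGo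
  rw [if_neg h1, if_neg h2, if_neg h3, if_neg h4]
  simp only [if_neg h5, if_neg h6]

theorem bGo_op1_nil (c : Char) (h1 : ¬ PySem.Chars.isspace c = true)
    (h2 : ¬ (c = '"' ∨ c = '\'')) (h3 : ¬ PySem.Chars.isdigit c = true)
    (h4 : ¬ (PySem.Chars.isalpha c || c = '_') = true) (h6 : c ∈ pvOpChars) :
    bGo [c] = [("[bold]".toList ++ [c] ++ "[/bold]".toList)] := by
  conv_lhs => unfold bGo
  rw [if_neg h1, if_neg h2, if_neg h3, if_neg h4]
  simp only [if_pos h6]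

theorem bGo_other_nil (c : Char) (h1 : ¬ PySem.Chars.isspace c = true)
    (h2 : ¬ (c = '"' ∨ c = '\'')) (h3 : ¬ PySem.Chars.isdigit c = true)
    (h4 : ¬ (PySem.Chars.isalpha c || c = '_') = true) (h6 : ¬ c ∈ pvOpChars) :
    bGo [c] = [[c]] := by
  conv_lhs => unfold bGo
  rw [if_neg h1, if_neg h2, if_neg h3, if_neg h4]
  simp only [if_neg h6]

-- one-line evaluation lemmas for aWrap (keep markup literals unexpanded in proofs)
theorem aWrap_space (x : List Char) : aWrap (.space, x) = x := rfl
theorem aWrap_string (x : List Char) : aWrap (.string, x) = "[yellow]".toList ++ x ++ "[/yellow]".toList := rfl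
theorem aWrap_number (x : List Char) : aWrap (.number, x) = "[cyan]".toList ++ x ++ "[/cyan]".toList := rfl
theorem aWrap_keyword (x : List Char) : aWrap (.keyword, x) = "[bold green]".toList ++ x ++ "[/bold green]".toList := rfl
theorem aWrap_function (x : List Char) : aWrap (.function, x) = "[magenta]".toList ++ x ++ "[/magenta]".toList := rfl
theorem aWrap_identifier (x : List Char) : aWrap (.identifier, x) = x := rfl
theorem aWrap_operator (x : List Char) : aWrap (.operator, x) = "[bold]".toList ++ x ++ "[/bold]".toList := rfl
theorem aWrap_other (x : List Char) : aWrap (.other, x) = x := rfl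

-- MAIN: B's fused loop produces exactly A's wrapped tokens
theorem main_eq (cs : List Char) (j : Nat) (hj : j ≤ cs.length) :
    bGo (cs.drop j) = (aTok cs j).map aWrap := by
  by_cases h : j < cs.length
  · have hd := drop_eq_getD_cons cs j h
    by_cases hsp : PySem.Chars.isspace (cs.getD j ' ') = true
    · have ih := main_eq cs (j + 1) (by omega)
      rw [aTok_space cs j h hsp, hd, bGo_space _ _ hsp, ih, List.map_cons, aWrap_space]
    · by_cases hqt : cs.getD j ' ' = '"' ∨ cs.getD j ' ' = '\''
      · set q := cs.getD j ' ' with hqdef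
        set j1 := aStrEnd cs q (j + 1) with hj1
        have hle1 : j + 1 ≤ j1 := le_aStrEnd cs q (j + 1)
        set j2 := (if j1 < cs.length then j1 + 1 else j1) with hj2
        have hle3 : j2 ≤ cs.length := by
          have := aStrEnd_le cs q (j + 1) (by omega)
          rw [hj2]; split <;> omega
        have hj2gt : j < j2 := by rw [hj2]; split <;> omega
        have hstr := bStrBody_eq cs q (j + 1) (by omega)
        rw [← hj1, ← hj2] at hstr
        have ih := main_eq cs j2 hle3
        have h2t : j2 - j = (j2 - (j + 1)) + 1 := by omega
        rw [aTok_str cs j h hsp hqt, ← hj1, ← hj2, hd, bGo_str _ _ hsp hqt, hstr, ih,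
            List.map_cons, aWrap_string, h2t, List.take_succ_cons]
      · by_cases hdg : PySem.Chars.isdigit (cs.getD j ' ') = true
        · set j1 := aScan (fun ch => PySem.Chars.isdigit ch || ch = '.') cs j with hj1
          have hstep : j1 = aScan (fun ch => PySem.Chars.isdigit ch || ch = '.') cs (j + 1) := by
            rw [hj1]
            exact aScan_step _ cs j h (by simp only [Bool.or_eq_true]; exact Or.inl hdg)
          have hle1 : j + 1 ≤ j1 := by
            rw [hstep]; exact le_aScan _ cs (j + 1)
          have hle2 : j1 ≤ cs.length := aScan_le _ cs j hj
          have hrun := bTakeRun_eq (fun ch => PySem.Chars.isdigit ch || ch = '.') cs j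
          rw [← hj1] at hrun
          have ih := main_eq cs j1 hle2
          rw [aTok_num cs j h hsp hqt hdg, ← hj1, hd, bGo_num _ _ hsp hqt hdg, ← hd, hrun, ih,
              List.map_cons, aWrap_number]
        · by_cases hal : (PySem.Chars.isalpha (cs.getD j ' ') || cs.getD j ' ' = '_') = true
          · set j1 := aScan (fun ch => PySem.Chars.isalnum ch || ch = '_') cs j with hj1
            have hstep : j1 = aScan (fun ch => PySem.Chars.isalnum ch || ch = '_') cs (j + 1) := by
              rw [hj1]
              exact aScan_step _ cs j h (alnum_of_alpha_or_underscore _ hal)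
            have hle1 : j + 1 ≤ j1 := by
              rw [hstep]; exact le_aScan _ cs (j + 1)
            have hle2 : j1 ≤ cs.length := aScan_le _ cs j hj
            have hrun := bTakeRun_eq (fun ch => PySem.Chars.isalnum ch || ch = '_') cs j
            rw [← hj1] at hrun
            have hca := bCallAhead_eq cs j1
            have ih := main_eq cs j1 hle2
            rw [aTok_word cs j h hsp hqt hdg hal, ← hj1, hd, bGo_word _ _ hsp hqt hdg hal, ← hd, hrun, ih,
                List.map_cons, hca]
            by_cases hkw : (cs.drop j).take (j1 - j) ∈ pvKeywords
            · rw [if_pos hkw, if_pos hkw, aWrap_keyword]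
            · by_cases hfn : aScan PySem.Chars.isspace cs j1 < cs.length ∧
                  cs.getD (aScan PySem.Chars.isspace cs j1) ' ' = '('
              · rw [if_neg hkw, if_neg hkw, if_pos (decide_eq_true hfn), if_pos hfn, aWrap_function]
              · rw [if_neg hkw, if_neg hkw, if_neg (fun hc => hfn (of_decide_eq_true hc)),
                    if_neg hfn, aWrap_identifier]
          · by_cases h2 : j + 1 < cs.length
            · have hd2 := drop_eq_getD_cons cs (j + 1) h2
              by_cases hop2 : [cs.getD j ' ', cs.getD (j + 1) ' '] ∈ pvOps2
              · have ih := main_eq cs (j + 2) (by omega)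
                rw [aTok_op2 cs j h hsp hqt hdg hal ⟨h2, hop2⟩, hd, hd2,
                    bGo_op2 _ _ _ hsp hqt hdg hal hop2, show j + 1 + 1 = j + 2 from rfl, ih,
                    List.map_cons, aWrap_operator]
              · have ih := main_eq cs (j + 1) (by omega)
                have hcond : ¬ (j + 1 < cs.length ∧ [cs.getD j ' ', cs.getD (j + 1) ' '] ∈ pvOps2) :=
                  fun hc => hop2 hc.2
                by_cases hop1 : cs.getD j ' ' ∈ pvOpChars
                · rw [aTok_op1 cs j h hsp hqt hdg hal hcond hop1, hd, hd2,
                      bGo_op1_cons _ _ _ hsp hqt hdg hal hop2 hop1, ← hd2, ih,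
                      List.map_cons, aWrap_operator]
                · rw [aTok_other cs j h hsp hqt hdg hal hcond hop1, hd, hd2,
                      bGo_other_cons _ _ _ hsp hqt hdg hal hop2 hop1, ← hd2, ih,
                      List.map_cons, aWrap_other]
            · have hend : cs.drop (j + 1) = [] := List.drop_eq_nil_of_le (by omega)
              have hcond : ¬ (j + 1 < cs.length ∧ [cs.getD j ' ', cs.getD (j + 1) ' '] ∈ pvOps2) :=
                fun hc => h2 hc.1
              have hstop : aTok cs (j + 1) = [] := aTok_stop cs (j + 1) (by omega)
              by_cases hop1 : cs.getD j ' ' ∈ pvOpChars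
              · rw [aTok_op1 cs j h hsp hqt hdg hal hcond hop1, hd, hend,
                    bGo_op1_nil _ hsp hqt hdg hal hop1, hstop, List.map_cons, aWrap_operator,
                    List.map_nil]
              · rw [aTok_other cs j h hsp hqt hdg hal hcond hop1, hd, hend,
                    bGo_other_nil _ hsp hqt hdg hal hop1, hstop, List.map_cons, aWrap_other,
                    List.map_nil]
  · have h0 : cs.drop j = [] := List.drop_eq_nil_of_le (Nat.le_of_not_lt h)
    rw [aTok_stop cs j h, h0]
    simp [bGo]
termination_by cs.length - j
decreasing_by
  all_goals ((try simp only [hqdef, hj1, hj2] at *); omega)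

-- ===== VERDICT (by name: the statement is the Claim_ definition above) =====
theorem syntax_highlight_expr_py_spec : Claim_equal_syntax_highlight_expr_py := by
  intro expr _
  unfold Spec_syntax_highlight_expr_py syntax_highlight_expr_py syntax_highlight_expr_py_alt
  have h := main_eq expr.toList 0 (by omega)
  simp only [List.drop_zero] at h
  rw [h, PySem.List.foldl_append_singleton_eq_map]
  simp
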